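-- pv_equiv track=rewrite | github.com/vlong638/VL.Python | 0.Basis/3.Algorithoms/Completed/3.57.三数之和.py | leave3
-- ===== SOURCE A (Python) =====
-- def leave3(numbers):
--     result=[numbers[0]]
--     count=1
--     i=1
--     while i<len(numbers):
--         if numbers[i]==numbers[i-1]:
--             count+=1
--             if count<=3:
--                 result.append(numbers[i])
--         else:
--             count=1
--             result.append(numbers[i])
--         i+=1
--     return result
-- ===== SOURCE B (Python) =====
-- def leave3(numbers):
--     result = []
--     n = len(numbers)
--     i = 0
--     while i < n:
--         j = i + 1
--         while j < n and numbers[j] == numbers[i]: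
--             j += 1
--         result += [numbers[i]] * min(3, j - i)
--         i = j
--     return result
-- ===== Notes on version B (the rewrite author's own statement) =====
-- stated objective: alternative
-- what changed: B splits the list into maximal runs of equal elements with a two-pointer scan and emits min(3, run length) copies per run, replacing A's element-by-element pass with a duplicate counter and per-element branch.
import Mathlib
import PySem

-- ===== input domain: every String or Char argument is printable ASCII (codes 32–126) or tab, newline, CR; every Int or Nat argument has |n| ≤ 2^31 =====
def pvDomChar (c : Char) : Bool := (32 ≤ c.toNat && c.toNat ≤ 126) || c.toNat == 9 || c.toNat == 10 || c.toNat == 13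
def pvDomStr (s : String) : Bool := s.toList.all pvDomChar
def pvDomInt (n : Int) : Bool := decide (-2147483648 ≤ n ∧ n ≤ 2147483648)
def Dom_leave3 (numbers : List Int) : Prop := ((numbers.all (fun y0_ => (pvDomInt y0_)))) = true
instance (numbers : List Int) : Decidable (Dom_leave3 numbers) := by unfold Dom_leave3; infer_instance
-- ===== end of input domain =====

-- B keeps at most 3 of each maximal run of equal elements via a two-pointer run scan
-- (alternative decomposition, same cost); Pre_ excludes the empty list, on which A raises IndexError.

-- ===== PORT A =====
-- the loop body of A's while loop (result/count state, index i)
def stepA (numbers : List Int) (st : List Int × Int) (i : Int) : List Int × Int :=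
  if PySem.List.pyGetD numbers i 0 = PySem.List.pyGetD numbers (i - 1) 0 then
    (if st.2 + 1 ≤ 3 then st.1 ++ [PySem.List.pyGetD numbers i 0] else st.1, st.2 + 1)
  else
    (st.1 ++ [PySem.List.pyGetD numbers i 0], 1)

def leave3 (numbers : List Int) : List Int :=
  ((PySem.List.pyRange 1 (numbers.length : Int) 1).foldl (stepA numbers)
    ([PySem.List.pyGetD numbers 0 0], 1)).1

-- ===== PORT B =====
-- length of the inner while scan: numbers[j] == numbers[i] run
def countRun (x : Int) : List Int → Nat
  | [] => 0
  | y :: ys => if y = x then countRun x ys + 1 else 0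

-- the outer while loop; fuel = remaining length bounds the recursion (each step consumes ≥ 1 element)
def altGo : Nat → List Int → List Int
  | _, [] => []
  | 0, _ :: _ => []
  | Nat.succ fuel, x :: xs =>
    List.replicate (min 3 (countRun x xs + 1)) x ++ altGo fuel (xs.drop (countRun x xs))

def leave3_alt (numbers : List Int) : List Int := altGo numbers.length numbers

-- ===== PRECONDITION & SPEC =====
-- A indexes the first element before its loop, so it raises IndexError on the empty list; Pre_ excludes exactly that input.
def Pre_leave3 (numbers : List Int) : Prop := numbers ≠ []
instance (numbers : List Int) : Decidable (Pre_leave3 numbers) := by unfold Pre_leave3; infer_instance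
def pvWitness_leave3 : List Int := [1, 1, 1, 1, 2]

def Spec_leave3 (numbers : List Int) (out : List Int) : Prop := out = leave3_alt numbers
instance (numbers : List Int) (out : List Int) : Decidable (Spec_leave3 numbers out) := by unfold Spec_leave3; infer_instance

-- ===== CLAIM (what is proved, stated in full; the proofs are below) =====
def Claim_equal_leave3 : Prop := ∀ (numbers : List Int), Dom_leave3 numbers → Pre_leave3 numbers → Spec_leave3 numbers (leave3 numbers)

-- ===== LEMMAS AND PROOFS =====

-- common reference function: one element at a time, carrying the previous element and the run count
def goA (prev : Int) (count : Int) : List Int → List Int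
  | [] => []
  | y :: ys =>
    if y = prev then (if count + 1 ≤ 3 then [y] else []) ++ goA y (count + 1) ys
    else y :: goA y 1 ys

lemma foldA (numbers : List Int) (ys : List Int) :
    ∀ (a : Int) (result : List Int) (count : Int),
      1 ≤ a → numbers.drop a.toNat = ys →
      ((PySem.List.pyRange a (numbers.length : Int) 1).foldl (stepA numbers) (result, count)).1
        = result ++ goA (PySem.List.pyGetD numbers (a - 1) 0) count ys := by
  induction ys with
  | nil =>
    intro a result count ha hdrop
    have hlen : (numbers.length : Int) ≤ a := by
      have := List.drop_eq_nil_iff.mp hdrop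
      omega
    rw [PySem.List.pyRange_one_eq_nil hlen]
    simp [goA]
  | cons y ys ih =>
    intro a result count ha hdrop
    have hlt : a.toNat < numbers.length := by
      by_contra h
      rw [List.drop_eq_nil_of_le (by omega)] at hdrop
      simp at hdrop
    have haInt : a < (numbers.length : Int) := by omega
    have hy : numbers[a.toNat] = y := by
      have h0 : (numbers.drop a.toNat)[0]? = some y := by rw [hdrop]; rfl
      rw [List.getElem?_drop] at h0
      obtain ⟨_, h⟩ := List.getElem_of_getElem? (by simpa using h0)
      exact h
    have hget : PySem.List.pyGetD numbers a 0 = y := by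
      rw [PySem.List.pyGetD_eq_getElem numbers 0 (by omega) haInt, hy]
    have hdrop' : numbers.drop (a + 1).toNat = ys := by
      have : (a + 1).toNat = a.toNat + 1 := by omega
      rw [this, ← List.drop_drop, hdrop]
      rfl
    rw [PySem.List.pyRange_one_cons haInt]
    simp only [List.foldl_cons]
    simp only [stepA, hget, goA]
    by_cases hcmp : y = PySem.List.pyGetD numbers (a - 1) 0
    · simp only [if_pos hcmp]
      by_cases hc : count + 1 ≤ 3
      · simp only [if_pos hc]
        have := ih (a + 1) (result ++ [y]) (count + 1) (by omega) hdrop'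
        simp only [add_sub_cancel_right, hget] at this
        rw [this, List.append_assoc]
      · simp only [if_neg hc]
        have := ih (a + 1) result (count + 1) (by omega) hdrop'
        simp only [add_sub_cancel_right, hget] at this
        rw [this, List.nil_append]
    · simp only [if_neg hcmp]
      have := ih (a + 1) (result ++ [y]) 1 (by omega) hdrop'
      simp only [add_sub_cancel_right, hget] at this
      rw [this, List.append_assoc]
      rfl

lemma leave3_eq_goA (x : Int) (xs : List Int) :
    leave3 (x :: xs) = x :: goA x 1 xs := by
  unfold leave3
  have := foldA (x :: xs) xs 1 [PySem.List.pyGetD (x :: xs) 0 0] 1 (by omega) (by simp)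
  rw [this]
  norm_num [PySem.List.pyGetD_zero_cons]

lemma take_countRun (x : Int) : ∀ xs : List Int, xs.take (countRun x xs) = List.replicate (countRun x xs) x := by
  intro xs
  induction xs with
  | nil => rfl
  | cons y ys ih =>
    by_cases h : y = x
    · simp [countRun, h, List.replicate_succ, ih]
    · simp [countRun, h]

lemma head_drop_countRun (x : Int) : ∀ xs : List Int, (xs.drop (countRun x xs)).head? ≠ some x := by
  intro xs
  induction xs with
  | nil => simp
  | cons y ys ih =>
    by_cases h : y = x
    · simpa [countRun, h] using ih
    · simp [countRun, h]

lemma goA_run (x : Int) : ∀ (k : Nat) (c : Int) (rest : List Int), rest.head? ≠ some x →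
    goA x c (List.replicate k x ++ rest)
      = List.replicate (min (3 - c) (k : Int)).toNat x
          ++ (match rest with | [] => [] | y :: ys => y :: goA y 1 ys) := by
  intro k
  induction k with
  | zero =>
    intro c rest hrest
    have : (min (3 - c) ((0 : Nat) : Int)).toNat = 0 := by omega
    rw [this]
    cases rest with
    | nil => simp [goA]
    | cons y ys =>
      have hy : y ≠ x := by simpa using hrest
      simp [goA, hy]
  | succ k ih =>
    intro c rest hrest
    rw [List.replicate_succ, List.cons_append]
    simp only [goA]
    rw [ih (c + 1) rest hrest]
    by_cases hc : c + 1 ≤ 3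
    · rw [if_pos hc]
      have hcount : (min (3 - c) ((k : Int) + 1)).toNat = (min (3 - (c + 1)) (k : Int)).toNat + 1 := by omega
      push_cast
      rw [hcount, List.replicate_succ]
      simp
    · rw [if_neg hc]
      have hcount : (min (3 - c) ((k : Int) + 1)).toNat = (min (3 - (c + 1)) (k : Int)).toNat := by omega
      push_cast
      rw [hcount]
      simp

lemma alt_eq_goA_aux : ∀ (n : Nat) (xs : List Int) (x : Int), xs.length ≤ n →
    altGo (n + 1) (x :: xs) = x :: goA x 1 xs := by
  intro n
  induction n with
  | zero =>
    intro xs x hlen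
    have : xs = [] := by
      cases xs with
      | nil => rfl
      | cons a l => simp at hlen
    subst this
    simp [altGo, countRun, goA]
  | succ n ih =>
    intro xs x hlen
    have hsplit : xs = List.replicate (countRun x xs) x ++ xs.drop (countRun x xs) := by
      conv_lhs => rw [← List.take_append_drop (countRun x xs) xs]
      rw [take_countRun]
    rw [altGo]
    conv_rhs => rw [hsplit]
    rw [goA_run x (countRun x xs) 1 (xs.drop (countRun x xs)) (head_drop_countRun x xs)]
    have hklen : countRun x xs ≤ xs.length := by
      have := congrArg List.length hsplit
      simp at this
      omega
    cases hrest : xs.drop (countRun x xs) with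
    | nil =>
      simp only [altGo]
      have hcount : min 3 (countRun x xs + 1) = (min (3 - 1) ((countRun x xs : Nat) : Int)).toNat + 1 := by omega
      rw [hcount, List.replicate_succ]
      simp
    | cons y ys =>
      have hys : ys.length ≤ n := by
        have := congrArg List.length hrest
        simp at this
        omega
      have hfuel : altGo (n + 1) (y :: ys) = y :: goA y 1 ys := ih ys y hys
      rw [hfuel]
      have hcount : min 3 (countRun x xs + 1) = (min (3 - 1) ((countRun x xs : Nat) : Int)).toNat + 1 := by omega
      rw [hcount, List.replicate_succ]
      simp

lemma alt_eq_goA (x : Int) (xs : List Int) : leave3_alt (x :: xs) = x :: goA x 1 xs := by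
  unfold leave3_alt
  exact alt_eq_goA_aux xs.length xs x le_rfl

-- ===== VERDICT (by name: the statement is the Claim_ definition above) =====
theorem leave3_spec : Claim_equal_leave3 := by
  intro numbers _ hpre
  unfold Spec_leave3
  cases numbers with
  | nil => exact absurd rfl hpre
  | cons x xs => rw [leave3_eq_goA, alt_eq_goA]
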